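-- pv_equiv track=rewrite | github.com/language-ml/Tajiki-Shahname | 01_OCR Tajiki/02_organize_poems.py | group_poem
-- ===== SOURCE A (Python) =====
-- def group_poem(all_verse):
--     create_poem = lambda: {"Title": [], 'Verse': []}
--     return_value = [create_poem()]
--
--     for kind, line in all_verse:
--         if kind == 'Title':
--             if len(return_value[-1]['Verse']) != 0:
--                 return_value.append(create_poem())
--         return_value[-1][kind].append(line)
--     return return_value
-- ===== SOURCE B (Python) =====
-- def group_poem(all_verse):
--     # Single backward pass: a poem boundary is exactly a Verse -> Title
--     # adjacency, so scan from the end, close the current poem whenever a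
--     # Verse line is followed by a Title line, and build everything in
--     # reverse (reversing once at the end) instead of mutating the last
--     # dict of a growing forward list.
--     poems_rev = []          # finished poems, last poem of the text first
--     t_rev, v_rev = [], []   # current poem's lines, in reverse order
--     nxt = None              # kind of the line just after the current one
--     for kind, line in reversed(all_verse):
--         if kind == 'Verse' and nxt == 'Title':
--             poems_rev.append({'Title': t_rev[::-1], 'Verse': v_rev[::-1]})
--             t_rev, v_rev = [], []
--         {'Title': t_rev, 'Verse': v_rev}[kind].append(line)
--         nxt = kind
--     poems_rev.append({'Title': t_rev[::-1], 'Verse': v_rev[::-1]})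
--     return poems_rev[::-1]
-- ===== Notes on version B (the rewrite author's own statement) =====
-- stated objective: alternative
-- what changed: Replaces A's forward loop that mutates the last dict of a growing list (new poem when the current poem already has verses) by a single backward pass that closes a poem at each Verse->Title adjacency, accumulating every list in reverse and reversing once at the end.
import Mathlib
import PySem

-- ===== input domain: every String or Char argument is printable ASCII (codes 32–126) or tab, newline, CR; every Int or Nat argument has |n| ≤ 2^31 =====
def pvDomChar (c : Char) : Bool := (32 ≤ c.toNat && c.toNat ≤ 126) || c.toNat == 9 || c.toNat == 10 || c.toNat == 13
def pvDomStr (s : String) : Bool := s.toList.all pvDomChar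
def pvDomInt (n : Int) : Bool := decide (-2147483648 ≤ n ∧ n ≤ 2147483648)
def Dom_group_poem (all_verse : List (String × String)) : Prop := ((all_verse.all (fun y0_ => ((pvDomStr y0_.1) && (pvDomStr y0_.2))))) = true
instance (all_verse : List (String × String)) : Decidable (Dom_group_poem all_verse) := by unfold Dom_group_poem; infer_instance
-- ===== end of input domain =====

-- B replaces A's forward loop (mutating the last dict of a growing list) by a single
-- backward pass that closes a poem at each Verse->Title adjacency, building all lists
-- in reverse; objective: alternative decomposition, same O(n) cost.


-- ===== PORT A =====
-- Python dict {"Title": [], 'Verse': []} as an association list in insertion order.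
def createPoem : List (String × List String) := [("Title", []), ("Verse", [])]

-- d[k] for this fixed-shape dict; exact where k is a key of d (Pre_ guarantees the
-- only looked-up keys "Title"/"Verse" are present; Python raises KeyError otherwise).
def dictGet (d : List (String × List String)) (k : String) : List String :=
  (((d.find? (fun p => p.1 == k)).map (fun p => p.2)).getD [])

-- d[k].append(line): append to the list stored at key k, in place; exact where k ∈ keys d.
def dictAppend (d : List (String × List String)) (k : String) (line : String) :
    List (String × List String) :=
  d.map (fun p => if p.1 == k then (p.1, p.2 ++ [line]) else p)

-- one iteration of A's for-loop; rv[-1] / rv[:-1] via getLastD / dropLast (rv is never empty)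
def group_poem_step (rv : List (List (String × List String))) (kl : String × String) :
    List (List (String × List String)) :=
  let rv := if kl.1 == "Title" then
      (if (dictGet (rv.getLastD []) "Verse").length ≠ 0 then rv ++ [createPoem] else rv)
    else rv
  rv.dropLast ++ [dictAppend (rv.getLastD []) kl.1 kl.2]

def group_poem (all_verse : List (String × String)) : List (List (String × List String)) :=
  all_verse.foldl group_poem_step [createPoem]

-- ===== PORT B =====
-- one iteration of B's backward loop; state s = (poems_rev, t_rev, v_rev, nxt).
-- The dispatch {'Title': t_rev, 'Verse': v_rev}[kind].append(line) is ported as the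
-- two-way branch below; exact for kind in {"Title","Verse"} (Pre_), KeyError otherwise.
def group_poem_alt_step
    (s : List (List (String × List String)) × List String × List String × Option String)
    (kl : String × String) :
    List (List (String × List String)) × List String × List String × Option String :=
  let s := if kl.1 == "Verse" && s.2.2.2 == some "Title" then
      (s.1 ++ [[("Title", s.2.1.reverse), ("Verse", s.2.2.1.reverse)]], [], [], s.2.2.2)
    else s
  if kl.1 == "Title" then (s.1, s.2.1 ++ [kl.2], s.2.2.1, some kl.1)
  else if kl.1 == "Verse" then (s.1, s.2.1, s.2.2.1 ++ [kl.2], some kl.1)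
  else (s.1, s.2.1, s.2.2.1, some kl.1)

def group_poem_alt (all_verse : List (String × String)) : List (List (String × List String)) :=
  let st := all_verse.reverse.foldl group_poem_alt_step ([], [], [], none)
  (st.1 ++ [[("Title", st.2.1.reverse), ("Verse", st.2.2.1.reverse)]]).reverse

-- ===== PRECONDITION & SPEC =====
-- Pre_: every kind must be 'Title' or 'Verse'; on any other kind Python A raises KeyError
-- at return_value[-1][kind].append(line).
def Pre_group_poem (all_verse : List (String × String)) : Prop :=
  ∀ p ∈ all_verse, p.1 = "Title" ∨ p.1 = "Verse"
instance (all_verse : List (String × String)) : Decidable (Pre_group_poem all_verse) := by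
  unfold Pre_group_poem; infer_instance

def pvWitness_group_poem : (List (String × String)) :=
  [("Title", "On kings"), ("Verse", "a line"), ("Verse", "another"), ("Title", "Next poem"), ("Verse", "more")]

def Spec_group_poem (all_verse : List (String × String)) (out : List (List (String × List String))) : Prop := out = group_poem_alt all_verse
instance (all_verse : List (String × String)) (out : List (List (String × List String))) : Decidable (Spec_group_poem all_verse out) := by unfold Spec_group_poem; infer_instance

-- ===== CLAIM (what is proved, stated in full; the proofs are below) =====
def Claim_equal_group_poem : Prop := ∀ (all_verse : List (String × String)), Dom_group_poem all_verse → Pre_group_poem all_verse → Spec_group_poem all_verse (group_poem all_verse)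

-- ===== LEMMAS AND PROOFS =====

-- a poem dict with Title-list t and Verse-list v
def mkP (t v : List String) : List (String × List String) := [("Title", t), ("Verse", v)]

-- B's backward fold, as a foldr (foldl over the reverse)
def GB (l : List (String × String)) :
    List (List (String × List String)) × List String × List String × Option String :=
  l.foldr (fun x s => group_poem_alt_step s x) ([], [], [], none)

@[simp] lemma dictGet_mkP_Verse (t v : List String) : dictGet (mkP t v) "Verse" = v := by
  simp [dictGet, mkP, List.find?]

@[simp] lemma dictAppend_mkP_Title (t v : List String) (line : String) :
    dictAppend (mkP t v) "Title" line = mkP (t ++ [line]) v := by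
  simp [dictAppend, mkP]

@[simp] lemma dictAppend_mkP_Verse (t v : List String) (line : String) :
    dictAppend (mkP t v) "Verse" line = mkP t (v ++ [line]) := by
  simp [dictAppend, mkP]

lemma createPoem_eq : createPoem = mkP [] [] := rfl

lemma GB_nil : GB [] = ([], [], [], none) := rfl

lemma GB_cons (x : String × String) (l : List (String × String)) :
    GB (x :: l) = group_poem_alt_step (GB l) x := by
  simp [GB, List.foldr]

lemma GB_nxt (l : List (String × String)) :
    (GB l).2.2.2 = l.head?.map (fun p => p.1) := by
  cases l with
  | nil => rfl
  | cons x r =>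
    rw [GB_cons]
    unfold group_poem_alt_step
    split_ifs <;> simp

lemma group_poem_alt_eq (l : List (String × String)) :
    group_poem_alt l =
      mkP (GB l).2.1.reverse (GB l).2.2.1.reverse :: (GB l).1.reverse := by
  simp [group_poem_alt, GB, mkP, List.foldl_reverse]

lemma stepA_concat (rv : List (List (String × List String))) (ct cv : List String)
    (k line : String) :
    group_poem_step (rv ++ [mkP ct cv]) (k, line) =
      if k = "Title" ∧ cv ≠ [] then rv ++ [mkP ct cv, dictAppend createPoem k line]
      else rv ++ [dictAppend (mkP ct cv) k line] := by
  unfold group_poem_step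
  by_cases hk : k = "Title" <;> by_cases hcv : cv = [] <;>
    simp [hk, hcv]

lemma main_invariant (l : List (String × String))
    (rv : List (List (String × List String))) (ct cv : List String)
    (hpre : ∀ p ∈ l, p.1 = "Title" ∨ p.1 = "Verse") :
    List.foldl group_poem_step (rv ++ [mkP ct cv]) l =
      rv ++ (if l.head?.map (fun p => p.1) = some "Title" ∧ cv ≠ [] then
          mkP ct cv :: (mkP (GB l).2.1.reverse (GB l).2.2.1.reverse :: (GB l).1.reverse)
        else
          mkP (ct ++ (GB l).2.1.reverse) (cv ++ (GB l).2.2.1.reverse) :: (GB l).1.reverse) := by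
  induction l generalizing rv ct cv with
  | nil => simp [GB_nil, mkP]
  | cons x r ih =>
    obtain ⟨k, line⟩ := x
    have hr : ∀ p ∈ r, p.1 = "Title" ∨ p.1 = "Verse" := fun p hp => hpre p (by simp [hp])
    rw [List.foldl_cons, stepA_concat, GB_cons]
    rcases hpre (k, line) (by simp) with hk | hk <;> subst hk
    · -- k = "Title"
      by_cases hcv : cv = []
      · -- stays in the current poem
        simp only [hcv, ne_eq, not_true_eq_false, and_false, if_false]
        rw [show dictAppend (mkP ct []) "Title" line = mkP (ct ++ [line]) [] from by simp]
        rw [ih rv (ct ++ [line]) [] hr]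
        unfold group_poem_alt_step
        simp [List.append_assoc]
      · -- opens a new poem
        simp only [hcv, ne_eq, not_false_iff, and_self, if_true,
          List.head?_cons, Option.map_some]
        rw [show dictAppend createPoem "Title" line = mkP [line] [] from by
          rw [createPoem_eq]; simp]
        rw [show rv ++ [mkP ct cv, mkP [line] []] = (rv ++ [mkP ct cv]) ++ [mkP [line] []] from by
          simp]
        rw [ih (rv ++ [mkP ct cv]) [line] [] hr]
        unfold group_poem_alt_step
        simp [List.append_assoc]
    · -- k = "Verse"
      simp only [ne_eq, List.head?_cons, Option.map_some]
      rw [show dictAppend (mkP ct cv) "Verse" line = mkP ct (cv ++ [line]) from by simp]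
      rw [if_neg (by simp), ih rv ct (cv ++ [line]) hr]
      unfold group_poem_alt_step
      rw [GB_nxt]
      by_cases hnx : r.head?.map (fun p => p.1) = some "Title"
      · simp [hnx, mkP]
      · simp [hnx, mkP]

-- ===== VERDICT (by name: the statement is the Claim_ definition above) =====
theorem group_poem_spec : Claim_equal_group_poem := by
  intro l _ hpre
  unfold Spec_group_poem
  have h := main_invariant l [] [] [] hpre
  simp only [List.nil_append] at h ⊢
  rw [group_poem, createPoem_eq, h, group_poem_alt_eq]
  simp
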